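-- pv_equiv track=rewrite | github.com/lplnufpi/Automated_Essay_Scoring | LSTM/LSTM.py | discretize
-- ===== SOURCE A (Python) =====
-- def discretize(y_pred):
--     y_cat = []
--     for t in y_pred:
--         if t[0] < 20:
--             y_cat.append(0)
--         elif 20 <= t[0] < 60:
--             y_cat.append(40)
--         elif 60 <= t[0] < 100:
--             y_cat.append(80)
--         elif 100 <= t[0] < 140:
--             y_cat.append(120)
--         elif 140 <= t[0] < 180:
--             y_cat.append(160)
--         elif 180 <= t[0]:
--             y_cat.append(200)
--
--     return y_cat
-- ===== SOURCE B (Python) =====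
-- _THRESHOLDS = [20, 60, 100, 140, 180]
-- _OUTPUTS = [0, 40, 80, 120, 160, 200]
--
--
-- def _bucket(x):
--     lo, hi = 0, len(_THRESHOLDS)
--     while lo < hi:
--         mid = (lo + hi) // 2
--         if x < _THRESHOLDS[mid]:
--             hi = mid
--         else:
--             lo = mid + 1
--     return _OUTPUTS[lo]
--
--
-- def discretize(y_pred):
--     return [_bucket(t[0]) for t in y_pred]
-- ===== Notes on version B (the rewrite author's own statement) =====
-- stated objective: idiomatic
-- what changed: Replaces the six-branch if/elif comparison chain with a threshold/output lookup table consulted by binary search, mapped over the input in a list comprehension instead of an accumulating loop.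
import Mathlib
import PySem

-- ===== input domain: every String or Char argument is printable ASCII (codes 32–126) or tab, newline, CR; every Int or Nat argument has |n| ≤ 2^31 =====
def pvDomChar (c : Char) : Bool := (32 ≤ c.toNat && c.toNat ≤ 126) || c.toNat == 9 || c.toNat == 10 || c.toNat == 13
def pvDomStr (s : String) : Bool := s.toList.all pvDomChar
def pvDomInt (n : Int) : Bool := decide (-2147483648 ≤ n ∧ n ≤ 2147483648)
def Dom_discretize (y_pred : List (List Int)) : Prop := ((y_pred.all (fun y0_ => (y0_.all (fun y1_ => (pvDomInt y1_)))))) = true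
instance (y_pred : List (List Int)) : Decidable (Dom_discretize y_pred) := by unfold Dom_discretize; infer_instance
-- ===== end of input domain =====

-- B replaces the if/elif chain with a thresholds/outputs lookup table consulted by binary search (idiomatic).
-- Pre_ excludes inputs containing an empty inner list, on which A raises IndexError.
-- ===== PORT A =====
def discretize (y_pred : List (List Int)) : List Int :=
  y_pred.foldl (fun (y_cat : List Int) (t : List Int) =>
    match PySem.List.pyGet? t 0 with
    | none => y_cat   -- t[0] raises IndexError in Python; excluded by Pre_
    | some x =>
      if x < 20 then y_cat ++ [0]
      else if 20 ≤ x ∧ x < 60 then y_cat ++ [40]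
      else if 60 ≤ x ∧ x < 100 then y_cat ++ [80]
      else if 100 ≤ x ∧ x < 140 then y_cat ++ [120]
      else if 140 ≤ x ∧ x < 180 then y_cat ++ [160]
      else if 180 ≤ x then y_cat ++ [200]
      else y_cat) []

-- ===== PORT B =====
def pvThresholds : List Int := [20, 60, 100, 140, 180]
def pvOutputs : List Int := [0, 40, 80, 120, 160, 200]

-- the while-loop binary search of Source B's _bucket, recursion on hi - lo
def pvBSearch (x : Int) (lo hi : Nat) : Nat :=
  if lo < hi then
    let mid := (lo + hi) / 2
    if x < pvThresholds.getD mid 0 then pvBSearch x lo mid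
    else pvBSearch x (mid + 1) hi
  else lo
termination_by hi - lo
decreasing_by all_goals omega

def pvBucket (x : Int) : Int := pvOutputs.getD (pvBSearch x 0 pvThresholds.length) 0

def discretize_alt (y_pred : List (List Int)) : List Int :=
  y_pred.map (fun t =>
    match PySem.List.pyGet? t 0 with
    | none => 0      -- t[0] raises IndexError in Python; excluded by Pre_
    | some x => pvBucket x)

-- ===== PRECONDITION & SPEC =====
-- Pre_ excludes exactly the inputs where some inner list is empty: there t[0] raises IndexError in A.
def Pre_discretize (y_pred : List (List Int)) : Prop := ∀ t ∈ y_pred, t ≠ []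
instance (y_pred : List (List Int)) : Decidable (Pre_discretize y_pred) := by unfold Pre_discretize; infer_instance
def pvWitness_discretize : List (List Int) := [[5], [20, 3], [199]]
def Spec_discretize (y_pred : List (List Int)) (out : List Int) : Prop := out = discretize_alt y_pred
instance (y_pred : List (List Int)) (out : List Int) : Decidable (Spec_discretize y_pred out) := by unfold Spec_discretize; infer_instance

-- ===== CLAIM (what is proved, stated in full; the proofs are below) =====
def Claim_equal_discretize : Prop := ∀ (y_pred : List (List Int)), Dom_discretize y_pred → Pre_discretize y_pred → Spec_discretize y_pred (discretize y_pred)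

-- ===== LEMMAS AND PROOFS =====
theorem pvBSearch_self (x : Int) (lo : Nat) : pvBSearch x lo lo = lo := by
  rw [pvBSearch]; simp

theorem pvBSearch_02 (x : Int) :
    pvBSearch x 0 2 = if x < 60 then (if x < 20 then 0 else 1) else 2 := by
  rw [pvBSearch]; norm_num [pvThresholds]
  rw [pvBSearch]; norm_num [pvThresholds]
  simp [pvBSearch_self]

theorem pvBSearch_35 (x : Int) :
    pvBSearch x 3 5 = if x < 180 then (if x < 140 then 3 else 4) else 5 := by
  rw [pvBSearch]; norm_num [pvThresholds]
  rw [pvBSearch]; norm_num [pvThresholds]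
  simp [pvBSearch_self]

theorem pvBucket_eq (x : Int) :
    pvBucket x = (if x < 20 then (0:Int) else if x < 60 then 40 else if x < 100 then 80
      else if x < 140 then 120 else if x < 180 then 160 else 200) := by
  unfold pvBucket
  rw [show pvThresholds.length = 5 from rfl, pvBSearch]
  norm_num [pvThresholds]
  rw [pvBSearch_02, pvBSearch_35]
  split_ifs <;> first | decide | omega

theorem discretize_foldl (l : List (List Int)) (acc : List Int)
    (h : ∀ t ∈ l, t ≠ []) :
    l.foldl (fun (y_cat : List Int) (t : List Int) =>
      match PySem.List.pyGet? t 0 with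
      | none => y_cat
      | some x =>
        if x < 20 then y_cat ++ [0]
        else if 20 ≤ x ∧ x < 60 then y_cat ++ [40]
        else if 60 ≤ x ∧ x < 100 then y_cat ++ [80]
        else if 100 ≤ x ∧ x < 140 then y_cat ++ [120]
        else if 140 ≤ x ∧ x < 180 then y_cat ++ [160]
        else if 180 ≤ x then y_cat ++ [200]
        else y_cat) acc = acc ++ discretize_alt l := by
  induction l generalizing acc with
  | nil => simp [discretize_alt]
  | cons t ts ih =>
    obtain ⟨a, rest, rfl⟩ : ∃ a rest, t = a :: rest := by
      cases t with
      | nil => exact absurd rfl (h _ (List.mem_cons_self ..))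
      | cons a rest => exact ⟨a, rest, rfl⟩
    simp only [List.foldl_cons, discretize_alt, List.map_cons]
    rw [ih _ (fun u hu => h u (List.mem_cons_of_mem _ hu))]
    simp only [PySem.List.pyGet?_zero_cons, pvBucket_eq]
    split_ifs <;> (try simp [discretize_alt, pvBucket_eq]) <;> omega

-- ===== VERDICT (by name: the statement is the Claim_ definition above) =====
theorem discretize_spec : Claim_equal_discretize := by
  intro y_pred _ hpre
  unfold Spec_discretize discretize
  simpa using discretize_foldl y_pred [] hpre
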